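-- pv_equiv track=rewrite | github.com/jshleap/StructBio | GP120classifier.py | create_artificial_PDBcodes
-- ===== SOURCE A (Python) =====
-- numbers=[0,1,2,3,4,5,6,7,8,9]
--
-- def create_artificial_PDBcodes(npdb,letters):
--     aPDBs=[]
--     indexes=[]
--     for i in range(len(numbers)):
--         for j in range(len(letters)):
--             for k in range(len(letters)):
--                 for l in range(len(letters)):
--                     indexes.append((i,j,k,l))
--
--     for n in range(npdb+1):
--         aPDBs.append('%s%s%s%s_'%(numbers[indexes[n][0]],letters[indexes[n][1]],letters[indexes[n][2]],letters[indexes[n][3]]))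
--
--     return aPDBs
-- ===== SOURCE B (Python) =====
-- numbers=[0,1,2,3,4,5,6,7,8,9]
--
-- def create_artificial_PDBcodes(npdb, letters):
--     # mixed-radix: compute the n-th (digit, letter, letter, letter) tuple directly
--     L = len(letters)
--     aPDBs = []
--     for n in range(npdb + 1):
--         q, l = divmod(n, L)
--         q, k = divmod(q, L)
--         i, j = divmod(q, L)
--         aPDBs.append('%s%s%s%s_' % (i, letters[j], letters[k], letters[l]))
--     return aPDBs
-- ===== Notes on version B (the rewrite author's own statement) =====
-- stated objective: faster
-- what changed: Instead of materialising all 10*L^3 index tuples in four nested loops and then indexing into that list, B computes the n-th mixed-radix tuple directly by repeated divmod in a single loop over the npdb+1 requested codes.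
import Mathlib
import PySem

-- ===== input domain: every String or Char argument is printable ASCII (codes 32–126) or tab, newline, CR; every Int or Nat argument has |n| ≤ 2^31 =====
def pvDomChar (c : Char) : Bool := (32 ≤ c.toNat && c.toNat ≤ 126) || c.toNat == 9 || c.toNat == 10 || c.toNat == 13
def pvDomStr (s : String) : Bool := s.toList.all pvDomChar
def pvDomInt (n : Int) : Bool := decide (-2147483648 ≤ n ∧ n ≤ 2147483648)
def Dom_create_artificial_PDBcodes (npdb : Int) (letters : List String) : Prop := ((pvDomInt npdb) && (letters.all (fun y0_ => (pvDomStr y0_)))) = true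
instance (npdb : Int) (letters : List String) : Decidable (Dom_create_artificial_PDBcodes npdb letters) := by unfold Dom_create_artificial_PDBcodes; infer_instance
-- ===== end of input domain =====

-- B replaces A's four nested loops that materialise all 10*L^3 index tuples by a direct
-- mixed-radix divmod computation of the n-th tuple, looping only over the npdb+1 requested codes.

-- ===== PORT A =====
def pvNumbers : List Int := [0,1,2,3,4,5,6,7,8,9]

def create_artificial_PDBcodes (npdb : Int) (letters : List String) : List String :=
  let indexes : List (Int × Int × Int × Int) :=
    (PySem.List.pyRange 0 (PySem.List.len pvNumbers) 1).foldl (fun acc i =>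
      (PySem.List.pyRange 0 (PySem.List.len letters) 1).foldl (fun acc j =>
        (PySem.List.pyRange 0 (PySem.List.len letters) 1).foldl (fun acc k =>
          (PySem.List.pyRange 0 (PySem.List.len letters) 1).foldl (fun acc l =>
            acc ++ [(i, j, k, l)]) acc) acc) acc) []
  (PySem.List.pyRange 0 (npdb + 1) 1).foldl (fun acc n =>
    let t := PySem.List.pyGetD indexes n (0, 0, 0, 0)   -- indexes[n]; in range exactly on Pre_
    acc ++ [PySem.Int.toStr (PySem.List.pyGetD pvNumbers t.1 0) ++
            PySem.List.pyGetD letters t.2.1 "" ++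
            PySem.List.pyGetD letters t.2.2.1 "" ++
            PySem.List.pyGetD letters t.2.2.2 "" ++ "_"]) []

-- ===== PORT B =====
def create_artificial_PDBcodes_alt (npdb : Int) (letters : List String) : List String :=
  let L : Int := PySem.List.len letters
  (PySem.List.pyRange 0 (npdb + 1) 1).foldl (fun acc n =>
    let q1 := PySem.Int.floordiv n L   -- q, l = divmod(n, L); L ≠ 0 whenever the loop runs, on Pre_
    let l  := PySem.Int.mod n L
    let q2 := PySem.Int.floordiv q1 L
    let k  := PySem.Int.mod q1 L
    let i  := PySem.Int.floordiv q2 L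
    let j  := PySem.Int.mod q2 L
    acc ++ [PySem.Int.toStr i ++
            PySem.List.pyGetD letters j "" ++
            PySem.List.pyGetD letters k "" ++
            PySem.List.pyGetD letters l "" ++ "_"]) []

-- ===== PRECONDITION & SPEC =====
-- A raises IndexError exactly when npdb ≥ 10 * len(letters)^3 (indexes[n] runs out of range);
-- Pre_ excludes exactly those inputs and nothing else.
def Pre_create_artificial_PDBcodes (npdb : Int) (letters : List String) : Prop :=
  npdb < 10 * (letters.length : Int) ^ 3
instance (npdb : Int) (letters : List String) : Decidable (Pre_create_artificial_PDBcodes npdb letters) := by unfold Pre_create_artificial_PDBcodes; infer_instance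

def pvWitness_create_artificial_PDBcodes : Int × List String := (5, ["a", "b"])

def Spec_create_artificial_PDBcodes (npdb : Int) (letters : List String) (out : List String) : Prop := out = create_artificial_PDBcodes_alt npdb letters
instance (npdb : Int) (letters : List String) (out : List String) : Decidable (Spec_create_artificial_PDBcodes npdb letters out) := by unfold Spec_create_artificial_PDBcodes; infer_instance

-- ===== CLAIM (what is proved, stated in full; the proofs are below) =====
def Claim_equal_create_artificial_PDBcodes : Prop := ∀ (npdb : Int) (letters : List String), Dom_create_artificial_PDBcodes npdb letters → Pre_create_artificial_PDBcodes npdb letters → Spec_create_artificial_PDBcodes npdb letters (create_artificial_PDBcodes npdb letters)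

-- ===== LEMMAS AND PROOFS =====

theorem length_flatMap_uniform {α β : Type} (xs : List α) (g : α → List β) (m : ℕ)
    (hm : ∀ a ∈ xs, (g a).length = m) : (xs.flatMap g).length = xs.length * m := by
  induction xs with
  | nil => simp
  | cons a xs ih =>
    simp only [List.flatMap_cons, List.length_append, List.length_cons]
    rw [hm a (by simp), ih (fun b hb => hm b (by simp [hb]))]
    ring

theorem getElem?_flatMap_uniform {α β : Type} (xs : List α) (g : α → List β) (m : ℕ)
    (hm : ∀ a ∈ xs, (g a).length = m) (n : ℕ) :
    (xs.flatMap g)[n]? = xs[n / m]?.bind (fun a => (g a)[n % m]?) := by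
  induction xs generalizing n with
  | nil => simp
  | cons a xs ih =>
    have hga : (g a).length = m := hm a (by simp)
    have ih' := ih (fun b hb => hm b (by simp [hb]))
    rcases Nat.eq_zero_or_pos m with hm0 | hm0
    · -- m = 0 : every block is empty
      have hlen : ((a :: xs).flatMap g).length = 0 := by
        rw [length_flatMap_uniform _ _ _ hm, hm0]; simp
      rw [List.getElem?_eq_none (by omega)]
      subst hm0
      have : (g a) = [] := List.eq_nil_of_length_eq_zero hga
      simp [this]
    · rcases Nat.lt_or_ge n m with h | h
      · have hdiv : n / m = 0 := Nat.div_eq_of_lt h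
        have hmod : n % m = n := Nat.mod_eq_of_lt h
        rw [List.flatMap_cons, List.getElem?_append_left (by omega), hdiv, hmod]
        simp
      · have hdiv : n / m = (n - m) / m + 1 := Nat.div_eq_sub_div hm0 h
        have hmod : n % m = (n - m) % m := Nat.mod_eq_sub_mod h
        rw [List.flatMap_cons, List.getElem?_append_right (by omega), hga, hdiv, hmod]
        simpa using ih' (n - m)

theorem getElem?_pyRange_zero_nat (b : Int) (k : ℕ) (hk : (k : Int) < b) :
    (PySem.List.pyRange 0 b 1)[k]? = some (k : Int) := by
  have hk' : k < (b - 0).toNat := by omega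
  have hr : (List.range (b - 0).toNat)[k]? = some k := List.getElem?_range hk'
  rw [PySem.List.pyRange_one, List.getElem?_map, hr]
  simp

theorem pvNumbers_getD (d : ℕ) (hd : d < 10) : pvNumbers.getD d 0 = (d : Int) := by
  interval_cases d <;> rfl

-- A's "indexes" list, read at position n, is exactly the mixed-radix decomposition of n.
theorem idx_get (L : ℕ) (n : ℕ) (hn : n < 10 * L ^ 3) :
    ((PySem.List.pyRange 0 10 1).flatMap (fun i =>
      (PySem.List.pyRange 0 (L : Int) 1).flatMap (fun j =>
        (PySem.List.pyRange 0 (L : Int) 1).flatMap (fun k =>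
          (PySem.List.pyRange 0 (L : Int) 1).map (fun l => (i, j, k, l))))))[n]? =
    some (((n / L ^ 3 : ℕ) : Int), ((n / L ^ 2 % L : ℕ) : Int),
          ((n / L % L : ℕ) : Int), ((n % L : ℕ) : Int)) := by
  have hL : 0 < L := by
    rcases Nat.eq_zero_or_pos L with h | h
    · subst h; simp at hn
    · exact h
  have hlen1 : ∀ (i j : Int), ((PySem.List.pyRange 0 (L : Int) 1).flatMap (fun k =>
      (PySem.List.pyRange 0 (L : Int) 1).map (fun l => (i, j, k, l)))).length = L ^ 2 := by
    intro i j
    rw [length_flatMap_uniform _ _ L (fun a _ => by simp [PySem.List.length_pyRange_one])]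
    simp [PySem.List.length_pyRange_one, pow_two]
  have hlen2 : ∀ (i : Int), ((PySem.List.pyRange 0 (L : Int) 1).flatMap (fun j =>
      (PySem.List.pyRange 0 (L : Int) 1).flatMap (fun k =>
        (PySem.List.pyRange 0 (L : Int) 1).map (fun l => (i, j, k, l))))).length = L ^ 3 := by
    intro i
    rw [length_flatMap_uniform _ _ (L ^ 2) (fun a _ => hlen1 i a)]
    rw [PySem.List.length_pyRange_one]
    have : ((L : Int) - 0).toNat = L := by omega
    rw [this]; ring
  rw [getElem?_flatMap_uniform _ _ (L ^ 3) (fun a _ => hlen2 a) n]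
  have hi : (↑(n / L ^ 3) : Int) < 10 := by
    have : n / L ^ 3 < 10 := Nat.div_lt_of_lt_mul (by omega)
    omega
  rw [getElem?_pyRange_zero_nat 10 _ hi, Option.bind_some]
  rw [getElem?_flatMap_uniform _ _ (L ^ 2) (fun a _ => hlen1 _ a) (n % L ^ 3)]
  have hr1 : n % L ^ 3 < L ^ 3 := Nat.mod_lt _ (by positivity)
  have hj : (↑(n % L ^ 3 / L ^ 2) : Int) < (L : Int) := by
    have hx : n % L ^ 3 < L ^ 2 * L := by rw [show L ^ 2 * L = L ^ 3 by ring]; exact hr1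
    have : n % L ^ 3 / L ^ 2 < L := Nat.div_lt_of_lt_mul hx
    omega
  rw [getElem?_pyRange_zero_nat _ _ hj, Option.bind_some]
  rw [getElem?_flatMap_uniform _ _ L (fun a _ => by simp [PySem.List.length_pyRange_one]) (n % L ^ 3 % L ^ 2)]
  have hr2 : n % L ^ 3 % L ^ 2 < L ^ 2 := Nat.mod_lt _ (by positivity)
  have hk : (↑(n % L ^ 3 % L ^ 2 / L) : Int) < (L : Int) := by
    have hx : n % L ^ 3 % L ^ 2 < L * L := by rw [show L * L = L ^ 2 by ring]; exact hr2
    have : n % L ^ 3 % L ^ 2 / L < L := Nat.div_lt_of_lt_mul hx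
    omega
  rw [getElem?_pyRange_zero_nat _ _ hk, Option.bind_some]
  have hl : n % L ^ 3 % L ^ 2 % L < ((L : Int) - 0).toNat := by
    have := Nat.mod_lt (n % L ^ 3 % L ^ 2) hL; omega
  rw [PySem.List.pyRange_one]
  rw [List.map_map]
  simp only [List.getElem?_map, List.getElem?_range, hl]
  -- now reconcile the two mixed-radix decompositions
  have e32 : L ^ 3 = L ^ 2 * L := by ring
  have e21 : L ^ 2 = L * L := by ring
  have d21 : L ^ 2 ∣ L ^ 3 := pow_dvd_pow L (by omega)
  have d11 : L ∣ L ^ 2 := dvd_pow_self L (by omega)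
  have hje : n % L ^ 3 / L ^ 2 = n / L ^ 2 % L := by
    rw [e32]; exact Nat.mod_mul_right_div_self n (L ^ 2) L
  have hke : n % L ^ 3 % L ^ 2 / L = n / L % L := by
    rw [Nat.mod_mod_of_dvd n d21, e21]
    exact Nat.mod_mul_right_div_self n L L
  have hle : n % L ^ 3 % L ^ 2 % L = n % L := by
    rw [Nat.mod_mod_of_dvd n d21, Nat.mod_mod_of_dvd n d11]
  rw [hje, hke, hle]
  simp

theorem create_artificial_PDBcodes_spec : Claim_equal_create_artificial_PDBcodes := by
  intro npdb letters _ hpre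
  unfold Pre_create_artificial_PDBcodes at hpre
  unfold Spec_create_artificial_PDBcodes create_artificial_PDBcodes create_artificial_PDBcodes_alt
  simp only [PySem.List.len_eq, PySem.List.foldl_append_singleton_eq_map,
    PySem.List.foldl_append_eq_flatMap, List.nil_append]
  apply List.map_congr_left
  intro n hn
  rw [PySem.List.mem_pyRange_one] at hn
  obtain ⟨nN, rfl⟩ : ∃ m : ℕ, n = (m : Int) := ⟨n.toNat, (Int.toNat_of_nonneg hn.1).symm⟩
  have hbound : nN < 10 * letters.length ^ 3 := by
    have hpre' : npdb < 10 * ((letters.length ^ 3 : ℕ) : Int) := by exact_mod_cast hpre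
    have h2 := hn.2
    omega
  have hnum : (pvNumbers.length : Int) = 10 := by decide
  have hget := idx_get letters.length nN hbound
  simp only [hnum]
  rw [PySem.List.pyGetD_natCast, List.getD_eq_getElem?_getD, hget]
  simp only [Option.getD_some]
  simp only [PySem.List.pyGetD_natCast, PySem.Int.floordiv_natCast, PySem.Int.mod_natCast,
    PySem.Int.toStr]
  rw [pvNumbers_getD _ (Nat.div_lt_of_lt_mul (by calc nN < 10 * letters.length ^ 3 := hbound
        _ = letters.length ^ 3 * 10 := by ring))]
  have hdd : nN / letters.length / letters.length = nN / letters.length ^ 2 := by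
    rw [Nat.div_div_eq_div_mul, pow_two]
  have hddd : nN / letters.length ^ 2 / letters.length = nN / letters.length ^ 3 := by
    rw [Nat.div_div_eq_div_mul,
      show letters.length ^ 3 = letters.length ^ 2 * letters.length by ring]
  rw [hdd, hddd]

-- ===== VERDICT (by name: the statement is the Claim_ definition above) =====
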